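-- pv_equiv track=rewrite | github.com/bliscosque/PythonCompetenceDevelopment | hackerrank/algorithms/implementation/38-fair_rations.py | fairRations
-- ===== SOURCE A (Python) =====
-- def fairRations(B):
--     ans=0
--     for i in range(len(B)-1):
--         if B[i]%2==1:
--             B[i]+=1
--             B[i+1]+=1
--             ans+=2
--     if B[-1]%2==1:
--         return 'NO'
--     return str(ans)
-- ===== SOURCE B (Python) =====
-- def fairRations(B):
--     # Stage 1: index the odd positions.  Stage 2: pair consecutive odd indices;
--     # each pair (p, q) costs 2*(q-p) loaves; an unpaired odd position means 'NO'.
--     # (A mutates B in place; this version does not -- equivalence is about the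
--     # return value only.)
--     odds = [i for i, x in enumerate(B) if x % 2]
--     if len(odds) % 2:
--         return 'NO'
--     return str(2 * sum(odds[i + 1] - odds[i] for i in range(0, len(odds), 2)))
-- ===== Notes on version B (the rewrite author's own statement) =====
-- stated objective: alternative
-- what changed: Replaces A's single in-place greedy pass (which mutates B and propagates parity through its own updates) with a two-stage algorithm: first collect the indices of the odd elements, then pair consecutive odd indices and sum 2*(q-p) per pair, returning 'NO' when an odd index is left unpaired; equivalence is about the return value only since B does not mutate its argument.
import Mathlib
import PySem

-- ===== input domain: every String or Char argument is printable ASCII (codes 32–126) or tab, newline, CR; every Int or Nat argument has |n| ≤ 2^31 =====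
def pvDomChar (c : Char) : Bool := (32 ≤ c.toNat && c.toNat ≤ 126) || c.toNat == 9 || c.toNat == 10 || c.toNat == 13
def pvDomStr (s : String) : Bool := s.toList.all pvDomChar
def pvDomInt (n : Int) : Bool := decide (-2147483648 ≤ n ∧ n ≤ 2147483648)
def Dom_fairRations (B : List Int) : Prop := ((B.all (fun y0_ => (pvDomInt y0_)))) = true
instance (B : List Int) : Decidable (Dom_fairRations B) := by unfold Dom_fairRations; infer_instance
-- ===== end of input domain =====

-- B replaces A's in-place greedy pass by a two-stage algorithm: collect the odd indices,
-- then pair consecutive odd indices, each pair (p,q) costing 2*(q-p); an unpaired odd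
-- index means 'NO' (objective: alternative; A mutates its argument, B does not — the
-- equivalence proved here is about the RETURN value only).

-- ===== PORT A =====
-- loop body: 'if B[i]%2==1: B[i]+=1; B[i+1]+=1; ans+=2' — indices i, i+1 are always in range
-- (i from range(len(B)-1)), so pyGetD/pySetD are exact here.
def fairRationsStep (st : List Int × Int) (i : Int) : List Int × Int :=
  if PySem.Int.mod (PySem.List.pyGetD st.1 i 0) 2 == 1 then
    let b1 := PySem.List.pySetD st.1 i (PySem.List.pyGetD st.1 i 0 + 1)
    let b2 := PySem.List.pySetD b1 (i + 1) (PySem.List.pyGetD b1 (i + 1) 0 + 1)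
    (b2, st.2 + 2)
  else st

-- the final parity test of the last element and the return, on the state after the loop
def fairRationsFin (st : List Int × Int) : String :=
  match PySem.List.pyGet? st.1 (-1) with
  | none => ""       -- indexing the last element raises IndexError on []; excluded by Pre_fairRations
  | some last => if PySem.Int.mod last 2 == 1 then "NO" else PySem.Int.toStr st.2

def fairRations (B : List Int) : String :=
  fairRationsFin ((PySem.List.pyRange 0 ((B.length : Int) - 1) 1).foldl fairRationsStep (B, 0))

-- ===== PORT B =====
-- 'odds = [i for i, x in enumerate(B) if x % 2]'
def fairOdds (B : List Int) : List Int :=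
  ((PySem.List.enumerate B).filter (fun p => PySem.Int.mod p.2 2 != 0)).map (fun p => p.1)

-- 'sum(odds[i+1] - odds[i] for i in range(0, len(odds), 2))' — two-at-a-time recursion;
-- under the even-length guard the one-element case is never reached.
def fairPairSum : List Int → Int
  | p :: q :: rest => (q - p) + fairPairSum rest
  | _ => 0

def fairRations_alt (B : List Int) : String :=
  let odds := fairOdds B
  if PySem.Int.mod (odds.length : Int) 2 != 0 then "NO"
  else PySem.Int.toStr (2 * fairPairSum odds)

-- ===== PRECONDITION & SPEC =====
-- A indexes the last element, which raises IndexError on the empty list; Pre_ excludes exactly that.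
def Pre_fairRations (B : List Int) : Prop := B ≠ []
instance (B : List Int) : Decidable (Pre_fairRations B) := by unfold Pre_fairRations; infer_instance
def pvWitness_fairRations : List Int := ([2, 3, 4, 5, 6])

def Spec_fairRations (B : List Int) (out : String) : Prop := out = fairRations_alt B
instance (B : List Int) (out : String) : Decidable (Spec_fairRations B out) := by unfold Spec_fairRations; infer_instance

-- ===== CLAIM (what is proved, stated in full; the proofs are below) =====
def Claim_equal_fairRations : Prop := ∀ (B : List Int), Dom_fairRations B → Pre_fairRations B → Spec_fairRations B (fairRations B)

-- ===== LEMMAS AND PROOFS =====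

-- reference run of A's loop: given the current value x of B[k] (original + carry) and the
-- untouched suffix after it, return (total added to ans, final value of the last element)
def frRun : Int → List Int → Int × Int
  | x, [] => (0, x)
  | x, y :: l =>
    if PySem.Int.mod x 2 == 1 then
      let r := frRun (y + 1) l; (r.1 + 2, r.2)
    else frRun y l

lemma pvMod2 (a : Int) : PySem.Int.mod a 2 = a % 2 := PySem.Int.mod_eq_emod_of_pos (by norm_num)

lemma pvFrRunOdd (x y : Int) (l : List Int) (h : x % 2 = 1) :
    frRun x (y :: l) = ((frRun (y + 1) l).1 + 2, (frRun (y + 1) l).2) := by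
  simp [frRun, h]

lemma pvFrRunEven (x y : Int) (l : List Int) (h : x % 2 ≠ 1) :
    frRun x (y :: l) = frRun y l := by
  simp [frRun, h]

lemma pvGetDAppend (done t : List Int) (x d : Int) : (done ++ x :: t).getD done.length d = x := by
  simp [List.getD]

lemma pvSetAppend (done t : List Int) (x v : Int) :
    (done ++ x :: t).set done.length v = done ++ v :: t := by
  induction done with
  | nil => simp
  | cons h tl ih => simp [ih]

-- invariant of A's loop: folding the remaining indices over the partially-mutated list
lemma pvLoopA (rest : List Int) : ∀ (done : List Int) (x ans : Int),
    ((PySem.List.pyRange (done.length : Int) ((done.length : Int) + rest.length) 1).foldl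
        fairRationsStep (done ++ x :: rest, ans)).2 = ans + (frRun x rest).1 ∧
    ((PySem.List.pyRange (done.length : Int) ((done.length : Int) + rest.length) 1).foldl
        fairRationsStep (done ++ x :: rest, ans)).1.getLast? = some (frRun x rest).2 := by
  induction rest with
  | nil =>
    intro done x ans
    rw [PySem.List.pyRange_one_eq_nil (by simp)]
    simp [frRun]
  | cons y l ih =>
    intro done x ans
    rw [PySem.List.pyRange_one_cons (by simp)]
    simp only [List.foldl_cons]
    have hget : PySem.List.pyGetD (done ++ x :: y :: l) (done.length : Int) 0 = x := by
      rw [PySem.List.pyGetD_natCast, pvGetDAppend]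
    by_cases hodd : x % 2 = 1
    · have hstep : fairRationsStep (done ++ x :: y :: l, ans) (done.length : Int)
          = ((done ++ [x + 1]) ++ (y + 1) :: l, ans + 2) := by
        simp only [fairRationsStep, hget, pvMod2, hodd, beq_self_eq_true, if_true]
        rw [PySem.List.pySetD_natCast, pvSetAppend]
        have h1 : (done.length : Int) + 1 = (((done ++ [x + 1]).length : Nat) : Int) := by
          simp
        rw [h1, PySem.List.pySetD_natCast, PySem.List.pyGetD_natCast]
        have h2 : done ++ (x + 1) :: y :: l = (done ++ [x + 1]) ++ y :: l := by simp
        rw [h2, pvGetDAppend, pvSetAppend]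
      rw [hstep]
      have hrange : PySem.List.pyRange ((done.length : Int) + 1)
            ((done.length : Int) + ((y :: l).length : Nat)) 1
          = PySem.List.pyRange (((done ++ [x + 1]).length : Nat) : Int)
            ((((done ++ [x + 1]).length : Nat) : Int) + (l.length : Nat)) 1 := by
        congr 1 <;> simp <;> omega
      rw [hrange]
      have hih := ih (done ++ [x + 1]) (y + 1) (ans + 2)
      rw [pvFrRunOdd x y l hodd]
      exact ⟨by rw [hih.1]; ring, by rw [hih.2]⟩
    · have hstep : fairRationsStep (done ++ x :: y :: l, ans) (done.length : Int)
          = (done ++ x :: y :: l, ans) := by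
        simp [fairRationsStep, hget, hodd]
      rw [hstep]
      have hrange : PySem.List.pyRange ((done.length : Int) + 1)
            ((done.length : Int) + ((y :: l).length : Nat)) 1
          = PySem.List.pyRange (((done ++ [x]).length : Nat) : Int)
            ((((done ++ [x]).length : Nat) : Int) + (l.length : Nat)) 1 := by
        congr 1 <;> simp <;> omega
      have hlist : done ++ x :: y :: l = (done ++ [x]) ++ y :: l := by simp
      rw [hrange, hlist]
      have hih := ih (done ++ [x]) y ans
      rw [pvFrRunEven x y l hodd]
      exact ⟨hih.1, hih.2⟩

-- the final value of the last element has the parity of the total sum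
lemma pvFrRunParity (rest : List Int) : ∀ (x : Int),
    (frRun x rest).2 % 2 = (x + rest.sum) % 2 := by
  induction rest with
  | nil => intro x; simp [frRun]
  | cons y l ih =>
    intro x
    by_cases hodd : x % 2 = 1
    · rw [pvFrRunOdd x y l hodd]
      have := ih (y + 1)
      simp only [List.sum_cons]
      omega
    · rw [pvFrRunEven x y l hodd]
      have := ih y
      simp only [List.sum_cons]
      omega

-- parity-only abstraction of A's loop counter: c is the running prefix parity
def frG : Int → List Int → Int
  | _, [] => 0
  | c, y :: l => c + frG ((c + y) % 2) l

lemma pvFrRunG (l : List Int) : ∀ x : Int, (frRun x l).1 = 2 * frG (x % 2) l := by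
  induction l with
  | nil => intro x; simp [frRun, frG]
  | cons y l' ih =>
    intro x
    have hx : x % 2 = 0 ∨ x % 2 = 1 := by omega
    by_cases hodd : x % 2 = 1
    · rw [pvFrRunOdd x y l' hodd, hodd]
      have h2 : (y + 1) % 2 = (1 + y) % 2 := by omega
      rw [ih (y + 1), h2]
      simp [frG]; ring
    · have h0 : x % 2 = 0 := by omega
      rw [pvFrRunEven x y l' hodd, h0, ih y]
      have h2 : y % 2 = (0 + y) % 2 := by omega
      rw [h2]
      simp [frG]

-- odd indices (proof-side reference, original values, start index k)
def frOdds : Int → List Int → List Int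
  | _, [] => []
  | k, y :: l => if y % 2 = 1 then k :: frOdds (k + 1) l else frOdds (k + 1) l

-- pairing cost with end index e: an unpaired last odd index p costs (e-1-p)
def frCostC (e : Int) : List Int → Int
  | [] => 0
  | [p] => e - 1 - p
  | p :: q :: rest => (q - p) + frCostC e rest

-- pairing cost with a run open at k
def frCostO (e k : Int) : List Int → Int
  | [] => e - 1 - k
  | q :: rest => (q - k) + frCostC e rest

-- the central correspondence: the parity-accumulator count equals the pairing cost
lemma pvGCost (l : List Int) : ∀ k : Int,
    frG 0 l = frCostC (k + 1 + l.length) (frOdds (k + 1) l) ∧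
    frG 1 l = frCostO (k + 1 + l.length) k (frOdds (k + 1) l) := by
  induction l with
  | nil => intro k; simp [frG, frOdds, frCostC, frCostO]
  | cons y l' ih =>
    intro k
    have hih := ih (k + 1)
    have he : (k + 1) + 1 + (l'.length : Int) = k + 1 + ((y :: l').length : Nat) := by
      simp; ring
    rw [he] at hih
    constructor
    · by_cases hodd : y % 2 = 1
      · have hG : frG 0 (y :: l') = frG 1 l' := by
          simp only [frG]; rw [show (0 + y) % 2 = 1 by omega]; ring
        rw [hG, hih.2]
        simp only [frOdds, hodd, if_true]
        cases h : frOdds (k + 1 + 1) l' with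
        | nil => simp [frCostC, frCostO]
        | cons q rest => simp [frCostC, frCostO]
      · have hG : frG 0 (y :: l') = frG 0 l' := by
          simp only [frG]; rw [show (0 + y) % 2 = 0 by omega]; ring
        rw [hG, hih.1]
        simp [frOdds, hodd]
    · by_cases hodd : y % 2 = 1
      · have hG : frG 1 (y :: l') = 1 + frG 0 l' := by
          simp only [frG]; rw [show (1 + y) % 2 = 0 by omega]
        rw [hG, hih.1]
        simp only [frOdds, hodd, if_true, frCostO]
        ring
      · have hG : frG 1 (y :: l') = 1 + frG 1 l' := by
          simp only [frG]; rw [show (1 + y) % 2 = 1 by omega]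
        rw [hG, hih.2]
        cases h : frOdds (k + 1 + 1) l' with
        | nil => simp [frOdds, hodd, h, frCostO]; ring
        | cons q rest => simp [frOdds, hodd, h, frCostO]; ring
  
-- the number of odd indices has the parity of the sum
lemma pvOddsParity (l : List Int) : ∀ k : Int,
    ((frOdds k l).length : Int) % 2 = l.sum % 2 := by
  induction l with
  | nil => intro k; simp [frOdds]
  | cons y l' ih =>
    intro k
    have := ih (k + 1)
    by_cases hodd : y % 2 = 1 <;> simp only [frOdds, hodd, if_true, if_false,
      List.length_cons, List.sum_cons] <;> push_cast <;> omega

-- on even-length lists the unpaired-last case of frCostC is never reached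
lemma pvCostCEven (odds : List Int) (e : Int) (h : odds.length % 2 = 0) :
    frCostC e odds = fairPairSum odds := by
  induction odds using fairPairSum.induct with
  | case1 p q rest ih =>
    simp only [List.length_cons] at h
    simp only [frCostC, fairPairSum, ih (by omega)]
  | case2 l hl =>
    match l, hl with
    | [], _ => simp [frCostC, fairPairSum]
    | [p], hl => simp at h
    | p :: q :: rest, hl => exact absurd rfl (hl p q rest)

-- B's odds (via enumerate) are exactly frOdds 0
lemma pvFairOdds (B : List Int) : ∀ s : Int,
    ((PySem.List.enumerate B s).filter (fun p => PySem.Int.mod p.2 2 != 0)).map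
      (fun p => p.1) = frOdds s B := by
  induction B with
  | nil => intro s; simp [PySem.List.enumerate_nil, frOdds]
  | cons y l ih =>
    intro s
    rw [PySem.List.enumerate_cons]
    by_cases hodd : y % 2 = 1
    · have : (PySem.Int.mod y 2 != 0) = true := by rw [pvMod2]; simp [hodd]
      simp only [List.filter_cons, this, if_true, List.map_cons, ih (s + 1), frOdds, hodd]
    · have h0 : y % 2 = 0 := by omega
      have : (PySem.Int.mod y 2 != 0) = false := by rw [pvMod2]; simp [h0]
      simp only [List.filter_cons, this, Bool.false_eq_true, if_false, ih (s + 1),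
        frOdds, hodd, if_false]

-- ===== VERDICT (by name: the statement is the Claim_ definition above) =====
theorem fairRations_spec : Claim_equal_fairRations := by
  intro B _ hpre
  match B with
  | [] => exact absurd rfl hpre
  | x :: rest =>
    unfold Spec_fairRations fairRations fairRations_alt fairRationsFin fairOdds
    have hloop := pvLoopA rest [] x 0
    simp only [List.nil_append, List.length_nil, Nat.cast_zero] at hloop
    have hub : ((x :: rest).length : Int) - 1 = (0 : Int) + (rest.length : Nat) := by simp
    rw [hub, PySem.List.pyGet?_neg_one, hloop.2, hloop.1]
    rw [pvFairOdds (x :: rest) 0]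
    have hpar := pvFrRunParity rest x
    have hopar := pvOddsParity (x :: rest) 0
    simp only [List.sum_cons] at hopar
    simp only [pvMod2]
    by_cases hs : (x + rest.sum) % 2 = 1
    · have h1 : (((frRun x rest).2 % 2 == 1) : Bool) = true := by
        simp only [beq_iff_eq]; omega
      have h2 : ((((frOdds 0 (x :: rest)).length : Int) % 2 != 0) : Bool) = true := by
        simp only [bne_iff_ne, ne_eq]; omega
      simp [h1, h2]
    · have h1 : (((frRun x rest).2 % 2 == 1) : Bool) = false := by
        simp only [beq_eq_false_iff_ne, ne_eq]; omega
      have h2 : ((((frOdds 0 (x :: rest)).length : Int) % 2 != 0) : Bool) = false := by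
        simp only [bne_eq_false_iff_eq]; omega
      simp only [h1, Bool.false_eq_true, if_false, h2, zero_add]
      congr 1
      have hlen : ((frOdds 0 (x :: rest)).length : Int) % 2 = 0 := by omega
      have hlenN : (frOdds 0 (x :: rest)).length % 2 = 0 := by omega
      have hG := pvFrRunG rest x
      have hx01 : x % 2 = 0 ∨ x % 2 = 1 := by omega
      rcases hx01 with hx | hx
      · -- x even: odds of x::rest = frOdds 1 rest, closed state
        have hodds : frOdds 0 (x :: rest) = frOdds 1 rest := by
          simp [frOdds, show ¬ x % 2 = 1 by omega]
        rw [hodds] at hlenN ⊢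
        have hc := (pvGCost rest 0).1
        simp only [zero_add] at hc
        rw [hG, hx, hc, pvCostCEven _ _ hlenN]
      · -- x odd: odds = 0 :: frOdds 1 rest, open state at 0
        have hodds : frOdds 0 (x :: rest) = 0 :: frOdds 1 rest := by
          simp [frOdds, hx]
        rw [hodds] at hlenN ⊢
        have hc := (pvGCost rest 0).2
        simp only [zero_add] at hc
        rw [hG, hx, hc]
        simp only [List.length_cons] at hlenN
        cases ht : frOdds 1 rest with
        | nil => rw [ht] at hlenN; simp at hlenN
        | cons q rest' =>
          rw [ht] at hlenN
          simp only [List.length_cons] at hlenN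
          simp only [frCostO, fairPairSum]
          rw [pvCostCEven _ _ (by omega)]
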